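-- pv_equiv track=rewrite | github.com/boostcampaitech7/level2-cv-datacentric-cv-22 | utils_independent/test_visualize.py | organize_by_language
-- ===== SOURCE A (Python) =====
-- def get_language_from_filename(filename):
--     """파일명에서 언어 코드를 추출합니다."""
--     try:
--         # extractor.zh.in_house... 형식에서 언어 코드 추출
--         parts = filename.split('.')
--         lang_code = parts[1]  # 두 번째 부분이 언어 코드
--
--         # 언어 코드를 전체 언어명으로 매핑
--         language_map = {
--             'zh': 'chinese',
--             'ja': 'japanese',
--             'th': 'thai',
--             'vi': 'vietnamese'
--         }
--         return language_map.get(lang_code, 'unknown')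
--     except:
--         return 'unknown'
--
-- def organize_by_language(annotations):
--     """어노테이션을 언어별로 분류합니다."""
--     language_files = {
--         'chinese': [],
--         'japanese': [],
--         'thai': [],
--         'vietnamese': [],
--         'unknown': []
--     }
--
--     for image_name in annotations['images'].keys():
--         lang = get_language_from_filename(image_name)
--         language_files[lang].append(image_name)
--
--     return language_files
-- ===== SOURCE B (Python) =====
-- def get_language_from_filename(filename):
--     """파일명에서 언어 코드를 추출합니다."""
--     parts = filename.split('.')
--     if len(parts) < 2:
--         return 'unknown'
--     return {'zh': 'chinese', 'ja': 'japanese',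
--             'th': 'thai', 'vi': 'vietnamese'}.get(parts[1], 'unknown')
--
-- def organize_by_language(annotations):
--     """어노테이션을 언어별로 분류합니다."""
--     table = [(name, get_language_from_filename(name))
--              for name in annotations['images'].keys()]
--     return {cat: [name for name, lang in table if lang == cat]
--             for cat in ('chinese', 'japanese', 'thai', 'vietnamese', 'unknown')}
-- ===== Notes on version B (the rewrite author's own statement) =====
-- stated objective: alternative
-- what changed: Replaces the mutate-buckets-in-a-dict pass with a two-phase decomposition: first build an immutable (name, language) table, then construct the result as a dict comprehension that selects each fixed category's names from the table.
import Mathlib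
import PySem

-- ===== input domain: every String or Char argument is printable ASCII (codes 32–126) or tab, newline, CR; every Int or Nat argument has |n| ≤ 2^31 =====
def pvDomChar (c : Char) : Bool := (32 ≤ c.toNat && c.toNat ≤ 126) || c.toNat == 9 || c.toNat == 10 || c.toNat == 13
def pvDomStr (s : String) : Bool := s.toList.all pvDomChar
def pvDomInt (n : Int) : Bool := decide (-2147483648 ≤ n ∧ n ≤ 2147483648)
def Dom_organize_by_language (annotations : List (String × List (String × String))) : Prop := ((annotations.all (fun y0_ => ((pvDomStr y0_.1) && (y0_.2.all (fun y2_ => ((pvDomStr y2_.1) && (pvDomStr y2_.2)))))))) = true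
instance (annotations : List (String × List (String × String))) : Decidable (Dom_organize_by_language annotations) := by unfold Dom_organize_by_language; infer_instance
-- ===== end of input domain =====

-- B replaces A's mutate-buckets-in-a-dict pass with a two-phase decomposition
-- (build a (name, language) table, then select each fixed category from it); same cost.


-- ===== PORT A =====
-- the literal dict language_map of get_language_from_filename
def pvLanguageMap : PySem.Dict String String :=
  PySem.Dict.mk [("zh", "chinese"), ("ja", "japanese"), ("th", "thai"), ("vi", "vietnamese")]

-- shared helper of A and B (Source B defines the same function, early-return style)
def get_language_from_filename (filename : String) : String :=
  -- parts = filename.split('.'): sep "." ≠ "" so split? is always some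
  match PySem.List.pyGet? ((PySem.Str.split? filename ".").getD []) 1 with
  | none => "unknown"            -- parts[1] raised IndexError; the except returns 'unknown'
  | some lang_code => pvLanguageMap.getD lang_code "unknown"

def organize_by_language (annotations : List (String × List (String × String))) : List (String × List String) :=
  let language_files : PySem.Dict String (List String) :=
    PySem.Dict.mk [("chinese", []), ("japanese", []), ("thai", []), ("vietnamese", []), ("unknown", [])]
  match (PySem.Dict.ofList annotations).get? "images" with
  | none => []                   -- KeyError on annotations['images']; excluded by Pre_
  | some images =>
      ((PySem.Dict.ofList images).keys.foldl
        (fun d image_name =>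
          d.modify (get_language_from_filename image_name) [] (· ++ [image_name]))
        language_files).items

-- ===== PORT B =====
def pvCategories : List String := ["chinese", "japanese", "thai", "vietnamese", "unknown"]

def organize_by_language_alt (annotations : List (String × List (String × String))) : List (String × List String) :=
  match (PySem.Dict.ofList annotations).get? "images" with
  | none => []                   -- KeyError, outside Pre_
  | some images =>
      let table := (PySem.Dict.ofList images).keys.map
        (fun name => (name, get_language_from_filename name))
      pvCategories.map (fun cat => (cat, (table.filter (fun p => p.2 == cat)).map Prod.fst))

-- ===== PRECONDITION & SPEC =====
-- Pre_ excludes exactly the inputs where A raises KeyError: dicts without an 'images' key.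
def Pre_organize_by_language (annotations : List (String × List (String × String))) : Prop :=
  "images" ∈ annotations.map Prod.fst
instance (annotations : List (String × List (String × String))) : Decidable (Pre_organize_by_language annotations) := by unfold Pre_organize_by_language; infer_instance

def pvWitness_organize_by_language : (List (String × List (String × String))) :=
  [("images", [("img.zh.a.jpg", "x"), ("img.vi.b.jpg", "y"), ("plain", "z")])]

def Spec_organize_by_language (annotations : List (String × List (String × String))) (out : List (String × List String)) : Prop := out = organize_by_language_alt annotations
instance (annotations : List (String × List (String × String))) (out : List (String × List String)) : Decidable (Spec_organize_by_language annotations out) := by unfold Spec_organize_by_language; infer_instance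

-- ===== CLAIM (what is proved, stated in full; the proofs are below) =====
def Claim_equal_organize_by_language : Prop := ∀ (annotations : List (String × List (String × String))), Dom_organize_by_language annotations → Pre_organize_by_language annotations → Spec_organize_by_language annotations (organize_by_language annotations)

-- ===== LEMMAS AND PROOFS =====

-- A's initial dict, named for the proofs
def pvInit : PySem.Dict String (List String) :=
  PySem.Dict.mk [("chinese", []), ("japanese", []), ("thai", []), ("vietnamese", []), ("unknown", [])]

-- the label computed by get_language_from_filename is always one of the five categories
theorem lang_mem_categories (n : String) :
    pvCategories.contains (get_language_from_filename n) = true := by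
  unfold get_language_from_filename
  generalize PySem.List.pyGet? ((PySem.Str.split? n ".").getD []) 1 = o
  cases o with
  | none => decide
  | some lc =>
      simp only [pvLanguageMap, PySem.Dict.getD, PySem.Dict.get?_mk_cons]
      repeat' split
      all_goals first | decide | simp [PySem.Dict.get?, pvCategories]

theorem init_contains_lang (n : String) :
    pvInit.contains (get_language_from_filename n) = true := by
  have h := lang_mem_categories n
  rw [List.contains_eq_mem, decide_eq_true_iff] at h
  rw [PySem.Dict.contains_iff_mem_keys]
  simpa [pvInit, PySem.Dict.keys_mk, pvCategories] using h

theorem init_getD (c : String) : pvInit.getD c [] = [] := by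
  simp only [pvInit, PySem.Dict.getD, PySem.Dict.get?_mk_cons]
  repeat' split
  all_goals simp [PySem.Dict.get?]

-- a modify-append loop over names, keyed by their language, read back at category c
theorem getD_lang_fold (names : List String) (d : PySem.Dict String (List String)) (c : String) :
    (names.foldl (fun d n => d.modify (get_language_from_filename n) [] (· ++ [n])) d).getD c []
      = d.getD c [] ++ names.filter (fun n => get_language_from_filename n == c) := by
  induction names generalizing d with
  | nil => simp
  | cons n ns ih =>
      simp only [List.foldl_cons, List.filter_cons, ih]
      by_cases h : get_language_from_filename n = c
      · subst h; simp [PySem.Dict.getD_modify_self]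
      · rw [PySem.Dict.getD_modify_of_ne d [] _ (fun e => h e.symm)]
        simp [h]

-- the loop never creates new keys when every language is already a key
theorem keys_lang_fold (names : List String) (d : PySem.Dict String (List String))
    (h : ∀ n, d.contains (get_language_from_filename n) = true) :
    (names.foldl (fun d n => d.modify (get_language_from_filename n) [] (· ++ [n])) d).keys = d.keys := by
  induction names generalizing d with
  | nil => rfl
  | cons n ns ih =>
      simp only [List.foldl_cons]
      rw [ih]
      · rw [PySem.Dict.keys_modify, PySem.Dict.keys_insert_of_contains _ _ (h n)]
      · intro m
        rw [PySem.Dict.contains_modify]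
        simp [h m]

-- ===== VERDICT (by name: the statement is the Claim_ definition above) =====
theorem organize_by_language_spec : Claim_equal_organize_by_language := by
  intro annotations _ hpre
  unfold Spec_organize_by_language organize_by_language organize_by_language_alt
  cases himg : (PySem.Dict.ofList annotations).get? "images" with
  | none =>
      exfalso
      rw [PySem.Dict.get?_eq_none_iff_not_mem_keys] at himg
      apply himg
      have : (PySem.Dict.ofList annotations).keys = PySem.Set.ofList (annotations.map Prod.fst) := by
        show (PySem.Dict.update PySem.Dict.empty annotations).keys = _
        rw [show (PySem.Dict.update PySem.Dict.empty annotations)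
              = annotations.foldl (fun d p => d.insert p.1 p.2) PySem.Dict.empty from rfl]
        rw [PySem.Dict.keys_foldl_insert_key]
        simp [PySem.Set.update_nil_left]
      rw [this, PySem.Set.mem_ofList]
      unfold Pre_organize_by_language at hpre
      simpa using hpre
  | some images =>
      simp only []
      have hfold := keys_lang_fold (PySem.Dict.ofList images).keys pvInit init_contains_lang
      have hnd : (List.foldl (fun d n => d.modify (get_language_from_filename n) [] (· ++ [n])) pvInit (PySem.Dict.ofList images).keys).keys.Nodup := by
        rw [hfold]; decide
      rw [show (PySem.Dict.mk [("chinese", ([] : List String)), ("japanese", []), ("thai", []), ("vietnamese", []), ("unknown", [])]) = pvInit from rfl]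
      rw [PySem.Dict.items_eq_map_keys _ hnd ([] : List String), hfold]
      rw [show pvInit.keys = pvCategories from rfl]
      apply List.map_congr_left
      intro c _
      rw [getD_lang_fold, init_getD]
      simp [List.filter_map, List.map_map, Function.comp_def]
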